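-- pv_equiv track=rewrite | github.com/giraygokirmak/asterisk-usbip-dongle | decode_sms.py | unpack_septets
-- ===== SOURCE A (Python) =====
-- def unpack_septets(data, padding=0, length=None):
--     """Unpack 7-bit septets from octets"""
--     bits = []
--     for byte in data:
--         bits.extend([int(b) for b in format(byte, '08b')[::-1]])  # LSB first
--
--     # Skip padding bits
--     bits = bits[padding:]
--
--     # Extract septets
--     septets = []
--     for i in range(0, len(bits), 7):
--         if length is not None and len(septets) >= length:
--             break
--         if i + 7 <= len(bits):
--             septet_bits = bits[i:i+7]
--             value = sum(bit << idx for idx, bit in enumerate(septet_bits))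
--             septets.append(value)
--
--     return septets
-- ===== SOURCE B (Python) =====
-- def unpack_septets(data, padding=0, length=None):
--     """Unpack 7-bit septets from octets"""
--     # Stream the octets into one integer accumulator, LSB-first, then pop
--     # full 7-bit groups off its low end.
--     buf = 0
--     bits = 0
--     for byte in data:
--         buf |= byte << bits
--         bits += 8
--     buf >>= padding
--     bits -= padding
--     septets = []
--     while bits >= 7:
--         if length is not None and len(septets) >= length:
--             break
--         septets.append(buf & 0x7F)
--         buf >>= 7
--         bits -= 7
--     return septets
-- ===== Notes on version B (the rewrite author's own statement) =====
-- stated objective: alternative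
-- what changed: B replaces A's materialized per-bit list (built byte-by-byte via format/reverse, then sliced and re-scanned in 7-bit windows) with a single integer accumulator from which each septet is popped by shift-and-mask; Pre_ restricts to the task's natural domain: octet values 0-255 (negative bytes make A raise ValueError; values above 255 widen A's bit stream through format, an accident of '08b') and nonnegative padding (negative padding hits Python's negative-slice wraparound in A, and B's shift raises there).
-- outside the precondition, e.g. on unpack_septets([8192], 0, None): A returns [0, 64], B returns [0]; on unpack_septets([65, 66], -3, None): A returns [], B raises ValueError
import Mathlib
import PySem

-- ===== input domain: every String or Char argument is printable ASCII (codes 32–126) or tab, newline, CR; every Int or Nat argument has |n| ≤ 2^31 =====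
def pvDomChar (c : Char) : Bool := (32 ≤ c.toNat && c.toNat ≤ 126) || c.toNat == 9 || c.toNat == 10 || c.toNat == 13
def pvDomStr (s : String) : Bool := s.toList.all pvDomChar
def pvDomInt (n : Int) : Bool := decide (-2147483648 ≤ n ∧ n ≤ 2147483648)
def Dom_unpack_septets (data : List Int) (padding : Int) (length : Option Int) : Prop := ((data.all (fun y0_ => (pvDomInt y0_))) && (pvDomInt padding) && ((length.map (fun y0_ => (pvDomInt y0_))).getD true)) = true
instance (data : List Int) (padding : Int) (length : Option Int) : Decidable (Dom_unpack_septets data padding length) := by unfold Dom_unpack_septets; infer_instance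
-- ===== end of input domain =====

-- B replaces A's materialized per-bit list with one integer accumulator whose septets are
-- popped off by shift-and-mask (objective: alternative decomposition, similar cost).


-- ===== PORT A =====
-- [int(c) for c in format(n, 'b')[::-1]] for n ≥ 0: binary digits LSB-first (hand port, exact for n ≥ 0)
def pvBinRev (n : Nat) : List Int :=
  if n = 0 then [] else ((n % 2 : Nat) : Int) :: pvBinRev (n / 2)
decreasing_by exact Nat.div_lt_self (by omega) (by omega)

-- [int(c) for c in format(byte, '08b')[::-1]]: '08b' left-pads with zeros to width 8, so the
-- reversed digit list gets its zeros appended at the tail (exact for 0 ≤ byte, i.e. under Pre_)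
def pvByteBits (byte : Int) : List Int :=
  let d := pvBinRev byte.toNat
  d ++ List.replicate (8 - d.length) 0

-- sum(bit << idx for idx, bit in enumerate(septet_bits))
def pvSeptetValue (sb : List Int) : Int :=
  ((PySem.List.enumerate sb 0).map (fun p => p.2 <<< p.1.toNat)).sum

-- 'length is not None and len(septets) >= length'
def pvBreak (length : Option Int) (n : Nat) : Bool :=
  match length with
  | some L => decide (L ≤ (n : Int))
  | none => false

-- the 'for i in range(0, len(bits), 7)' loop with its break
def pvGoA (bits : List Int) (length : Option Int) : List Int → List Int → List Int
  | [], septets => septets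
  | i :: rest, septets =>
    if pvBreak length septets.length then septets
    else if i + 7 ≤ (bits.length : Int) then
      pvGoA bits length rest
        (septets ++ [pvSeptetValue (PySem.List.slice bits (some i) (some (i + 7)))])
    else pvGoA bits length rest septets

def unpack_septets (data : List Int) (padding : Int) (length : Option Int) : List Int :=
  let bits0 := data.foldl (fun acc byte => acc ++ pvByteBits byte) []
  let bits := PySem.List.slice bits0 (some padding) none
  pvGoA bits length (PySem.List.pyRange 0 (bits.length : Int) 7) []

-- ===== PORT B =====
-- 'length is not None and len(septets) >= length' (B's copy of the loop-cap test)
def pvBreakB (length : Option Int) (n : Nat) : Bool :=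
  match length with
  | some L => decide (L ≤ (n : Int))
  | none => false

-- the 'while bits >= 7' loop of Source B (buf & 0x7F via PySem.Int.band)
def pvGoB (length : Option Int) (buf bits : Int) (septets : List Int) : List Int :=
  if 7 ≤ bits then
    if pvBreakB length septets.length then septets
    else pvGoB length (buf >>> (7 : Nat)) (bits - 7) (septets ++ [PySem.Int.band buf 127])
  else septets
termination_by bits.toNat
decreasing_by omega

-- 'buf >>= padding' ported as '>>> padding.toNat': exact for 0 ≤ padding (Pre_; Python raises
-- ValueError on a negative shift count)
def unpack_septets_alt (data : List Int) (padding : Int) (length : Option Int) : List Int :=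
  let p := data.foldl
    (fun (p : Int × Int) (byte : Int) => (PySem.Int.bor p.1 (byte <<< p.2.toNat), p.2 + 8))
    (0, 0)
  pvGoB length (p.1 >>> padding.toNat) (p.2 - padding) []

-- ===== PRECONDITION & SPEC =====
-- Pre_ restricts to the task's natural domain: octet values 0–255 (on negative bytes A raises
-- ValueError via int('-'); on bytes above 255 format(byte,'08b') silently widens A's bit stream,
-- an accident of the format string) and nonnegative padding (a negative padding hits Python's
-- negative-slice wraparound in A, an artefact; B's shift raises ValueError there).
def Pre_unpack_septets (data : List Int) (padding : Int) (length : Option Int) : Prop :=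
  (∀ b ∈ data, 0 ≤ b ∧ b < 256) ∧ 0 ≤ padding
instance (data : List Int) (padding : Int) (length : Option Int) : Decidable (Pre_unpack_septets data padding length) := by unfold Pre_unpack_septets; infer_instance

def pvWitness_unpack_septets : List Int × Int × Option Int := ([72, 229, 3], 2, some 2)

def Spec_unpack_septets (data : List Int) (padding : Int) (length : Option Int) (out : List Int) : Prop := out = unpack_septets_alt data padding length
instance (data : List Int) (padding : Int) (length : Option Int) (out : List Int) : Decidable (Spec_unpack_septets data padding length out) := by unfold Spec_unpack_septets; infer_instance

-- ===== CLAIM (what is proved, stated in full; the proofs are below) =====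
def Claim_equal_unpack_septets : Prop := ∀ (data : List Int) (padding : Int) (length : Option Int), Dom_unpack_septets data padding length → Pre_unpack_septets data padding length → Spec_unpack_septets data padding length (unpack_septets data padding length)

-- ===== LEMMAS AND PROOFS =====

def pvVal (L : List Int) : Nat := L.foldr (fun b a => b.toNat + 2 * a) 0
def pvBits01 (L : List Int) : Prop := ∀ b ∈ L, b = 0 ∨ b = 1

theorem pvVal_append (x y : List Int) : pvVal (x ++ y) = pvVal x + 2 ^ x.length * pvVal y := by
  induction x with
  | nil => simp [pvVal]
  | cons b t ih =>
    simp only [List.cons_append, pvVal, List.foldr_cons, List.length_cons] at *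
    rw [ih]; ring

theorem pvVal_lt {L : List Int} (h : pvBits01 L) : pvVal L < 2 ^ L.length := by
  induction L with
  | nil => simp [pvVal]
  | cons b t ih =>
    have hb := h b (by simp)
    have ht : pvBits01 t := fun x hx => h x (by simp [hx])
    have := ih ht
    have hb1 : b.toNat ≤ 1 := by rcases hb with h|h <;> simp [h]
    simp only [pvVal, List.foldr_cons, List.length_cons] at *
    have : b.toNat + 2 * List.foldr (fun b a => b.toNat + 2 * a) 0 t < 2 ^ (t.length + 1) := by
      rw [pow_succ]; omega
    exact this

theorem pvVal_take {L : List Int} (h : pvBits01 L) (k : Nat) :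
    pvVal (L.take k) = pvVal L % 2 ^ k := by
  have hsplit := pvVal_append (L.take k) (L.drop k)
  rw [List.take_append_drop] at hsplit
  by_cases hk : k ≤ L.length
  · have hlen : (L.take k).length = k := by simp [hk]
    have hlt : pvVal (L.take k) < 2 ^ k := by
      have := pvVal_lt (L := L.take k) (fun x hx => h x (List.mem_of_mem_take hx))
      rwa [hlen] at this
    rw [hsplit, hlen, Nat.add_mul_mod_self_left, Nat.mod_eq_of_lt hlt]
  · rw [List.take_of_length_le (by omega)]
    have hlt : pvVal L < 2 ^ k :=
      lt_of_lt_of_le (pvVal_lt h) (Nat.pow_le_pow_right (by omega) (by omega))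
    rw [Nat.mod_eq_of_lt hlt]

theorem pvVal_drop {L : List Int} (h : pvBits01 L) (k : Nat) :
    pvVal (L.drop k) = pvVal L / 2 ^ k := by
  have hsplit := pvVal_append (L.take k) (L.drop k)
  rw [List.take_append_drop] at hsplit
  by_cases hk : k ≤ L.length
  · have hlen : (L.take k).length = k := by simp [hk]
    have hlt : pvVal (L.take k) < 2 ^ k := by
      have := pvVal_lt (L := L.take k) (fun x hx => h x (List.mem_of_mem_take hx))
      rwa [hlen] at this
    rw [hsplit, hlen, Nat.add_mul_div_left _ _ (by positivity), Nat.div_eq_of_lt hlt, Nat.zero_add]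
  · rw [List.drop_of_length_le (by omega)]
    have hlt : pvVal L < 2 ^ k :=
      lt_of_lt_of_le (pvVal_lt h) (Nat.pow_le_pow_right (by omega) (by omega))
    show (0:Nat) = _
    rw [Nat.div_eq_of_lt hlt]

theorem pvVal_cons (b : Int) (L : List Int) : pvVal (b :: L) = b.toNat + 2 * pvVal L := rfl

theorem pvBinRev_val (n : Nat) : pvVal (pvBinRev n) = n := by
  induction n using Nat.strong_induction_on with
  | _ n ih =>
    rw [pvBinRev]
    by_cases h : n = 0
    · simp [h, pvVal]
    · simp only [h, if_false]
      rw [pvVal, List.foldr_cons]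
      have := ih (n / 2) (Nat.div_lt_self (by omega) (by omega))
      rw [pvVal] at this
      rw [this]
      simp only [Int.toNat_natCast]
      omega

theorem pvBinRev_length_le {n k : Nat} (h : n < 2 ^ k) : (pvBinRev n).length ≤ k := by
  induction k generalizing n with
  | zero => rw [pvBinRev]; interval_cases n; simp
  | succ k ih =>
    rw [pvBinRev]
    by_cases h0 : n = 0
    · simp [h0]
    · simp only [h0, if_false, List.length_cons]
      have : n / 2 < 2 ^ k := by rw [pow_succ] at h; omega
      exact Nat.succ_le_succ (ih this)

theorem pvBinRev_bits01 (n : Nat) : pvBits01 (pvBinRev n) := by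
  induction n using Nat.strong_induction_on with
  | _ n ih =>
    rw [pvBinRev]
    by_cases h : n = 0
    · simp [h, pvBits01]
    · simp only [h, if_false]
      intro b hb
      rcases List.mem_cons.mp hb with h1 | h1
      · subst h1; omega
      · exact ih (n / 2) (Nat.div_lt_self (by omega) (by omega)) b h1

theorem pvVal_replicate_zero (m : Nat) : pvVal (List.replicate m (0 : Int)) = 0 := by
  induction m with
  | zero => rfl
  | succ k ih => simp [List.replicate_succ, pvVal, List.foldr_cons] at *; omega

theorem pvByteBits_val (b : Int) : pvVal (pvByteBits b) = b.toNat := by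
  rw [pvByteBits, pvVal_append, pvVal_replicate_zero, pvBinRev_val]; omega

theorem pvByteBits_length {b : Int} (hb : 0 ≤ b) (hb2 : b < 256) :
    (pvByteBits b).length = 8 := by
  rw [pvByteBits]
  simp only [List.length_append, List.length_replicate]
  have : b.toNat < 2 ^ 8 := by omega
  have := pvBinRev_length_le this
  omega

theorem pvByteBits_bits01 (b : Int) : pvBits01 (pvByteBits b) := by
  intro x hx
  rw [pvByteBits] at hx
  rcases List.mem_append.mp hx with h1 | h1
  · exact pvBinRev_bits01 _ x h1
  · left; exact List.eq_of_mem_replicate h1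

theorem pvBitsFold_bits01 (data : List Int) (init : List Int) (h : pvBits01 init) :
    pvBits01 (data.foldl (fun acc byte => acc ++ pvByteBits byte) init) := by
  induction data generalizing init with
  | nil => exact h
  | cons b t ih =>
    simp only [List.foldl_cons]
    exact ih _ (fun x hx => (List.mem_append.mp hx).elim (h x) (pvByteBits_bits01 b x))

-- disjoint-or is addition
theorem pvLorDisj (k : Nat) : ∀ a b : Nat, a < 2 ^ k → a ||| b * 2 ^ k = a + b * 2 ^ k := by
  induction k with
  | zero => intro a b h; interval_cases a; simp
  | succ k ih =>
    intro a b h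
    rw [pow_succ] at h ⊢
    rw [show b * (2 ^ k * 2) = (b * 2 ^ k) * 2 by ring] at *
    have h2 : a / 2 < 2 ^ k := by omega
    have key := ih (a / 2) b h2
    have hd : (a ||| b * 2 ^ k * 2) / 2 = a / 2 + b * 2 ^ k := by
      rw [Nat.or_div_two, Nat.mul_div_cancel _ (by omega : 0 < 2), key]
    have hm : (a ||| b * 2 ^ k * 2) % 2 = a % 2 := by
      have t0 := Nat.testBit_or a (b * 2 ^ k * 2) 0
      simp only [Nat.testBit_zero] at t0
      have hz : b * 2 ^ k * 2 % 2 = 0 := by omega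
      rcases Nat.mod_two_eq_zero_or_one a with h1 | h1 <;>
        rcases Nat.mod_two_eq_zero_or_one (a ||| b * 2 ^ k * 2) with h3 | h3 <;>
        simp [h1, h3, hz] at t0 ⊢
    have := Nat.div_add_mod (a ||| b * 2 ^ k * 2) 2
    omega

-- B's accumulator fold tracks (value, length) of A's bit list
theorem pvFoldB_spec (data : List Int) (h : ∀ b ∈ data, 0 ≤ b ∧ b < 256) (init : List Int)
    (h01 : pvBits01 init) :
    data.foldl
      (fun (p : Int × Int) (byte : Int) => (PySem.Int.bor p.1 (byte <<< p.2.toNat), p.2 + 8))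
      ((pvVal init : Int), (init.length : Int))
    = (((pvVal (data.foldl (fun acc byte => acc ++ pvByteBits byte) init) : Nat) : Int),
       (((data.foldl (fun acc byte => acc ++ pvByteBits byte) init).length : Nat) : Int)) := by
  induction data generalizing init with
  | nil => rfl
  | cons b t ih =>
    obtain ⟨hb0, hb1⟩ := h b (by simp)
    simp only [List.foldl_cons]
    rw [show PySem.Int.bor ((pvVal init : Nat) : Int) (b <<< ((init.length : Nat) : Int).toNat)
        = ((pvVal (init ++ pvByteBits b) : Nat) : Int) by
      rw [pvVal_append, pvByteBits_val b, Int.toNat_natCast, Int.shiftLeft_eq]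
      conv_lhs => rw [show b = ((b.toNat : Nat) : Int) from (Int.toNat_of_nonneg hb0).symm]
      rw [show (2 : Int) ^ init.length = ((2 ^ init.length : Nat) : Int) by push_cast; ring,
        ← Nat.cast_mul, PySem.Int.bor_natCast,
        pvLorDisj init.length (pvVal init) b.toNat (pvVal_lt h01)]
      push_cast; ring]
    rw [show ((init.length : Nat) : Int) + 8 = (((init ++ pvByteBits b).length : Nat) : Int) by
      rw [List.length_append, pvByteBits_length hb0 hb1]; push_cast; ring]
    exact ih (fun x hx => h x (by simp [hx])) _
      (fun x hx => (List.mem_append.mp hx).elim (h01 x) (pvByteBits_bits01 b x))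

theorem pvEnumSum (sb : List Int) (h : ∀ x ∈ sb, 0 ≤ x) (s : Nat) :
    ((PySem.List.enumerate sb (s : Int)).map (fun p => p.2 <<< p.1.toNat)).sum
      = ((2 ^ s * pvVal sb : Nat) : Int) := by
  induction sb generalizing s with
  | nil => simp [PySem.List.enumerate_nil, pvVal]
  | cons b t ih =>
    rw [PySem.List.enumerate_cons, List.map_cons, List.sum_cons]
    rw [show ((s : Nat) : Int) + 1 = (((s + 1 : Nat) : Nat) : Int) by push_cast; ring]
    rw [ih (fun x hx => h x (by simp [hx])) (s + 1)]
    rw [Int.shiftLeft_eq, pvVal_cons]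
    have hb : 0 ≤ b := h b (by simp)
    push_cast [Int.toNat_of_nonneg hb, Int.toNat_natCast]
    ring

theorem pvSeptetValue_eq {sb : List Int} (h : ∀ x ∈ sb, 0 ≤ x) :
    pvSeptetValue sb = ((pvVal sb : Nat) : Int) := by
  have := pvEnumSum sb h 0
  simpa [pvSeptetValue] using this

theorem pvRange7_nil {a b : Int} (h : b ≤ a) : PySem.List.pyRange a b 7 = [] := by
  rw [PySem.List.pyRange_of_pos a b (by omega)]
  rw [if_neg (by omega)]
  simp

theorem pvRange7_cons {a b : Int} (h : a < b) :
    PySem.List.pyRange a b 7 = a :: PySem.List.pyRange (a + 7) b 7 := by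
  rw [PySem.List.pyRange_of_pos a b (by omega), PySem.List.pyRange_of_pos (a + 7) b (by omega)]
  rw [if_pos h]
  have hcount : ((b - a + 7 - 1) / 7).toNat
      = (if a + 7 < b then ((b - (a + 7) + 7 - 1) / 7).toNat else 0) + 1 := by
    split_ifs <;> omega
  rw [hcount, List.range_succ_eq_map, List.map_cons, List.map_map]
  refine List.cons_eq_cons.mpr ⟨by push_cast; ring, ?_⟩
  apply List.map_congr_left
  intro k _
  simp only [Function.comp_apply]
  push_cast
  ring

def pvCnt (length : Option Int) (M k al : Nat) : Nat :=
  match length with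
  | none => M / 7 - k
  | some L => min (M / 7 - k) (L - (al : Int)).toNat

theorem pvGoA_spec (bits : List Int) (hb : pvBits01 bits) (length : Option Int) :
    ∀ (fuel k : Nat) (acc : List Int), bits.length ≤ 7 * k + 7 * fuel →
    pvGoA bits length (PySem.List.pyRange (7 * k : Nat) (bits.length : Int) 7) acc
      = acc ++ (List.range (pvCnt length bits.length k acc.length)).map
          (fun j => ((pvVal bits / 2 ^ (7 * (k + j)) % 128 : Nat) : Int)) := by
  intro fuel
  induction fuel with
  | zero =>
    intro k acc hle
    rw [pvRange7_nil (by exact_mod_cast Nat.le_of_lt_succ (by omega))]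
    have hc : pvCnt length bits.length k acc.length = 0 := by
      unfold pvCnt; cases length <;> simp <;> omega
    simp [pvGoA, hc]
  | succ fuel ih =>
    intro k acc hle
    by_cases hM : bits.length ≤ 7 * k
    · rw [pvRange7_nil (by exact_mod_cast hM)]
      have hc : pvCnt length bits.length k acc.length = 0 := by
        unfold pvCnt; cases length <;> simp <;> omega
      simp [pvGoA, hc]
    · have hlt : ((7 * k : Nat) : Int) < (bits.length : Int) := by exact_mod_cast by omega
      rw [pvRange7_cons hlt]
      rw [pvGoA]
      by_cases hbrk : pvBreak length acc.length
      · rw [if_pos hbrk]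
        obtain ⟨L, hL⟩ : ∃ L, length = some L := by
          cases length with
          | none => simp [pvBreak] at hbrk
          | some L => exact ⟨L, rfl⟩
        have hLle : L ≤ (acc.length : Int) := by
          subst hL; simpa [pvBreak] using hbrk
        have hc : pvCnt length bits.length k acc.length = 0 := by
          subst hL; unfold pvCnt; simp; omega
        simp [hc]
      · rw [if_neg hbrk]
        have hnb : ∀ L, length = some L → (acc.length : Int) < L := by
          intro L hL; subst hL
          simpa [pvBreak] using hbrk
        by_cases h7 : ((7 * k : Nat) : Int) + 7 ≤ (bits.length : Int)
        · rw [if_pos h7]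
          have hstep : (((7 * k : Nat) : Int)) + 7 = (((7 * (k + 1) : Nat) : Nat) : Int) := by
            push_cast; ring
          have hval : pvSeptetValue
                (PySem.List.slice bits (some ((7 * k : Nat) : Int)) (some (((7 * k : Nat) : Int) + 7)))
              = ((pvVal bits / 2 ^ (7 * k) % 128 : Nat) : Int) := by
            rw [show ((7 : Int)) = ((7 : Nat) : Int) from rfl,
              PySem.List.slice_natCast_add]
            rw [pvSeptetValue_eq (fun x hx => by
              rcases hb x (List.mem_of_mem_drop (List.mem_of_mem_take hx)) with h | h <;> omega)]
            have hd : pvBits01 (bits.drop (7 * k)) :=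
              fun x hx => hb x (List.mem_of_mem_drop hx)
            rw [pvVal_take hd 7, pvVal_drop hb (7 * k)]
            norm_num
          rw [hval, hstep]
          rw [ih (k + 1) (acc ++ [((pvVal bits / 2 ^ (7 * k) % 128 : Nat) : Int)]) (by omega)]
          have hc : pvCnt length bits.length k acc.length
              = pvCnt length bits.length (k + 1)
                  (acc ++ [((pvVal bits / 2 ^ (7 * k) % 128 : Nat) : Int)]).length + 1 := by
            have h7' : 7 * (k + 1) ≤ bits.length := by exact_mod_cast by push_cast at h7; omega
            cases length with
            | none => unfold pvCnt; simp; omega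
            | some L =>
              have := hnb L rfl
              unfold pvCnt; simp; omega
          rw [hc, List.range_succ_eq_map, List.map_cons, List.map_map, List.append_assoc]
          simp only [Nat.add_zero, List.cons_append]
          congr 2
          rw [List.nil_append]
          apply List.map_congr_left
          intro j _
          simp only [Function.comp_apply]
          have h' : k + 1 + j = k + (j + 1) := by omega
          rw [h']
        · rw [if_neg h7]
          have hstep : (((7 * k : Nat) : Int)) + 7 = (((7 * (k + 1) : Nat) : Nat) : Int) := by
            push_cast; ring
          rw [hstep, ih (k + 1) acc (by omega)]
          have hM7 : bits.length / 7 = k := by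
            push_cast at h7; omega
          have hc1 : pvCnt length bits.length k acc.length = 0 := by
            unfold pvCnt; cases length <;> simp <;> omega
          have hc2 : pvCnt length bits.length (k + 1) acc.length = 0 := by
            unfold pvCnt; cases length <;> simp <;> omega
          simp [hc1, hc2]

-- B's loop closed form
def pvCntB (length : Option Int) (b al : Nat) : Nat :=
  match length with
  | none => b / 7
  | some L => min (b / 7) (L - (al : Int)).toNat

theorem pvNatShiftRight_int (m k : Nat) : ((m : Int)) >>> k = ((m >>> k : Nat) : Int) :=
  Int.mem_toNat?.mp rfl

theorem pvBand127 (m : Nat) : PySem.Int.band ((m : Nat) : Int) 127 = ((m % 128 : Nat) : Int) := by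
  have h : m &&& 127 = m % 128 := by
    simpa using Nat.and_two_pow_sub_one_eq_mod m 7
  rw [show (127 : Int) = ((127 : Nat) : Int) from rfl, PySem.Int.band_natCast, h]

theorem pvGoB_spec (length : Option Int) :
    ∀ (n : Nat) (V : Nat) (bits : Int) (acc : List Int), bits.toNat ≤ n →
    pvGoB length ((V : Int)) bits acc
      = acc ++ (List.range (pvCntB length bits.toNat acc.length)).map
          (fun j => ((V / 2 ^ (7 * j) % 128 : Nat) : Int)) := by
  intro n
  induction n with
  | zero =>
    intro V bits acc hle
    rw [pvGoB, if_neg (by omega)]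
    have : pvCntB length bits.toNat acc.length = 0 := by
      unfold pvCntB; cases length <;> simp <;> omega
    simp [this]
  | succ n ih =>
    intro V bits acc hle
    rw [pvGoB]
    by_cases h7 : 7 ≤ bits
    · rw [if_pos h7]
      by_cases hbrk : pvBreakB length acc.length
      · rw [if_pos hbrk]
        obtain ⟨L, hL⟩ : ∃ L, length = some L := by
          cases length with
          | none => simp [pvBreakB] at hbrk
          | some L => exact ⟨L, rfl⟩
        have hLle : L ≤ (acc.length : Int) := by subst hL; simpa [pvBreakB] using hbrk
        have hc : pvCntB length bits.toNat acc.length = 0 := by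
          subst hL; unfold pvCntB; simp; omega
        simp [hc]
      · rw [if_neg hbrk]
        have hnb : ∀ L, length = some L → (acc.length : Int) < L := by
          intro L hL; subst hL; simpa [pvBreakB] using hbrk
        rw [pvNatShiftRight_int, pvBand127]
        rw [ih (V >>> 7) (bits - 7) (acc ++ [((V % 128 : Nat) : Int)]) (by omega)]
        have hc : pvCntB length bits.toNat acc.length
            = pvCntB length (bits - 7).toNat (acc ++ [((V % 128 : Nat) : Int)]).length + 1 := by
          cases length with
          | none => unfold pvCntB; simp; omega
          | some L =>
            have := hnb L rfl
            unfold pvCntB; simp; omega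
        rw [hc, List.range_succ_eq_map, List.map_cons, List.map_map, List.append_assoc]
        simp only [List.cons_append, List.nil_append, Nat.mul_zero, pow_zero, Nat.div_one]
        congr 2
        apply List.map_congr_left
        intro j _
        simp only [Function.comp_apply]
        rw [Nat.shiftRight_eq_div_pow, Nat.div_div_eq_div_mul, ← pow_add,
          show (7 : Nat) + 7 * j = 7 * (j + 1) by ring]
    · rw [if_neg h7]
      have hc : pvCntB length bits.toNat acc.length = 0 := by
        unfold pvCntB; cases length <;> simp <;> omega
      simp [hc]

theorem unpack_septets_eq (data : List Int) (padding : Int) (length : Option Int)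
    (hdata : ∀ b ∈ data, 0 ≤ b ∧ b < 256) (hpad : 0 ≤ padding) :
    unpack_septets data padding length = unpack_septets_alt data padding length := by
  simp only [unpack_septets, unpack_septets_alt]
  set L0 := data.foldl (fun acc byte => acc ++ pvByteBits byte) [] with hL0
  have h01 : pvBits01 L0 := pvBitsFold_bits01 data [] (by intro b hb; simp at hb)
  set T := L0.length with hT
  set N := pvVal L0 with hN
  set s := PySem.List.clampIdx T padding with hs
  have hsle : s ≤ T := PySem.List.clampIdx_le T padding
  have hsmin : s = min padding.toNat T := by
    rw [hs, show padding = ((padding.toNat : Nat) : Int) from (Int.toNat_of_nonneg hpad).symm,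
      PySem.List.clampIdx_natCast]
    omega
  -- B's accumulator fold
  have hfold := pvFoldB_spec data hdata [] (by intro b hb; simp at hb)
  rw [← hL0] at hfold
  simp only [List.length_nil, Nat.cast_zero,
    show ((pvVal ([] : List Int) : Nat) : Int) = 0 from rfl, ← hT, ← hN] at hfold
  rw [hfold]
  -- A's sliced bit list
  rw [PySem.List.slice_some_none, ← hT, ← hs]
  have hdlen : (L0.drop s).length = T - s := by simp [hT]
  have hd01 : pvBits01 (L0.drop s) := fun x hx => h01 x (List.mem_of_mem_drop hx)
  have hA := pvGoA_spec (L0.drop s) hd01 length (L0.drop s).length 0 [] (by omega)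
  rw [show ((7 * 0 : Nat) : Int) = 0 from rfl] at hA
  rw [hA]
  -- B's loop
  rw [pvNatShiftRight_int]
  have hbufeq : N >>> padding.toNat = pvVal (L0.drop s) := by
    rw [Nat.shiftRight_eq_div_pow, hN, ← pvVal_drop h01]
    by_cases hle : padding.toNat ≤ T
    · rw [hsmin, Nat.min_eq_left hle]
    · rw [List.drop_of_length_le (by omega), List.drop_of_length_le (by omega)]
  rw [hbufeq]
  have hB := pvGoB_spec length ((T : Int) - padding).toNat (pvVal (L0.drop s))
    ((T : Int) - padding) [] (le_refl _)
  rw [hB]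
  -- counts agree
  have hbits : ((T : Int) - padding).toNat = T - s := by
    rw [hsmin]; omega
  rw [hbits, hdlen, List.nil_append, List.nil_append]
  simp only [List.length_nil]
  have hcnt : pvCnt length (T - s) 0 0 = pvCntB length (T - s) 0 := by
    cases length <;> simp [pvCnt, pvCntB]
  rw [hcnt]
  apply List.map_congr_left
  intro j _
  simp only [Nat.zero_add]

-- ===== VERDICT (by name: the statement is the Claim_ definition above) =====
theorem unpack_septets_spec : Claim_equal_unpack_septets := by
  intro data padding length _ hpre
  unfold Spec_unpack_septets
  exact unpack_septets_eq data padding length hpre.1 hpre.2
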